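-- pv_equiv track=rewrite | github.com/NathanKolbas/dart-ort-artifacts | .github/scripts/generate_manifest.py | get_files_in_directories
-- ===== SOURCE A (Python) =====
-- from typing import Dict, List, Optional, Set, Any
--
-- def get_files_in_directories(files: List[str], directories: List[str]) -> Set[str]:
--     """Get all files from specified directories with full relative paths.
--
--     Only includes files directly in the directories (not subdirectories).
--     """
--     result = set()
--     for directory in directories:
--         dir_prefix = f"{directory}/"
--         for f in files:
--             if f.startswith(dir_prefix):
--                 relative = f[len(dir_prefix):]
--                 if relative and "/" not in relative:
--                     result.add(f)
--     return result
-- ===== SOURCE B (Python) =====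
-- from typing import Dict, List, Set
--
--
-- def get_files_in_directories(files: List[str], directories: List[str]) -> Set[str]:
--     """Get all files from specified directories with full relative paths.
--
--     Only includes files directly in the directories (not subdirectories).
--     Groups files by their parent directory once, then answers each directory
--     with a single dictionary lookup.
--     """
--     groups: Dict[str, List[str]] = {}
--     for f in files:
--         i = f.rfind("/")
--         if i != -1 and i != len(f) - 1:
--             groups.setdefault(f[:i], []).append(f)
--     result = set()
--     for directory in directories:
--         for f in groups.get(directory, []):
--             result.add(f)
--     return result
-- ===== Notes on version B (the rewrite author's own statement) =====
-- stated objective: faster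
-- what changed: Instead of scanning every file once per directory with a startswith test, B builds a dict grouping the files by their parent directory (the text before the last '/') in one pass and then answers each directory with a single O(1) lookup.
import Mathlib
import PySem

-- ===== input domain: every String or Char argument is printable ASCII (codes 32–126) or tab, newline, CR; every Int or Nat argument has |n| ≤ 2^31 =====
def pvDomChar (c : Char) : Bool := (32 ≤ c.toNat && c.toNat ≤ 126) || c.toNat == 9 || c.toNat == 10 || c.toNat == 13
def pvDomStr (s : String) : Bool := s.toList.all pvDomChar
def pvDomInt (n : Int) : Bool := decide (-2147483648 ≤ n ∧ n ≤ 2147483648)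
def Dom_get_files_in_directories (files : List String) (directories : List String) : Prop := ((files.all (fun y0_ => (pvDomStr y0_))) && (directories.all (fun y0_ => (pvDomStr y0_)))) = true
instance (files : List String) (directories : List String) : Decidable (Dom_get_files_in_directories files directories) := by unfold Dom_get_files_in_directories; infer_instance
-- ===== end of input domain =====

-- B groups the files by their parent directory in a dict built in one pass, then answers each
-- directory with a single lookup (objective: faster, O(F + D) instead of A's O(D * F)).

-- ===== PORT A =====
def get_files_in_directories (files : List String) (directories : List String) : List String :=
  directories.foldl (fun result directory =>
    let dir_prefix := directory ++ "/"
    files.foldl (fun result f =>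
      if PySem.Str.startswith f dir_prefix = true then
        let relative := PySem.Str.slice f (some (PySem.Str.len dir_prefix)) none
        if relative ≠ "" ∧ PySem.Str.isIn "/" relative = false then
          PySem.Set.add result f
        else result
      else result) result) PySem.Set.empty

-- ===== PORT B =====
def get_files_in_directories_alt (files : List String) (directories : List String) : List String :=
  let groups : PySem.Dict String (List String) :=
    files.foldl (fun groups f =>
      let i := PySem.Str.rfind f "/"
      if i ≠ -1 ∧ i ≠ PySem.Str.len f - 1 then
        groups.modify (PySem.Str.slice f none (some i)) [] (fun g => g ++ [f])
      else groups) PySem.Dict.empty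
  directories.foldl (fun result directory =>
    (groups.getD directory []).foldl (fun result f => PySem.Set.add result f) result) PySem.Set.empty

-- ===== PRECONDITION & SPEC =====
def Spec_get_files_in_directories (files : List String) (directories : List String) (out : List String) : Prop := out = get_files_in_directories_alt files directories
instance (files : List String) (directories : List String) (out : List String) : Decidable (Spec_get_files_in_directories files directories out) := by unfold Spec_get_files_in_directories; infer_instance

-- ===== CLAIM (what is proved, stated in full; the proofs are below) =====
def Claim_equal_get_files_in_directories : Prop := ∀ (files : List String) (directories : List String), Dom_get_files_in_directories files directories → Spec_get_files_in_directories files directories (get_files_in_directories files directories)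

-- ===== LEMMAS AND PROOFS =====

-- the parent directory B keys its groups by, and the boolean test a file must pass for directory d
def parentOf (f : String) : String := PySem.Str.slice f none (some (PySem.Str.rfind f "/"))

def matchesB (d f : String) : Bool :=
  decide ((PySem.Str.rfind f "/" ≠ -1 ∧ PySem.Str.rfind f "/" ≠ PySem.Str.len f - 1) ∧ parentOf f = d)

lemma toList_slash : ("/" : String).toList = ['/'] := rfl

lemma ne_empty_iff (s : String) : s ≠ "" ↔ s.toList ≠ ([] : List Char) :=
  not_congr (by rw [← String.toList_inj]; rfl)

lemma singleton_infix (a : Char) (l : List Char) : [a] <:+: l ↔ a ∈ l := by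
  constructor
  · intro h; exact h.sublist.subset (by simp)
  · intro h
    obtain ⟨s, t, rfl⟩ := List.append_of_mem h
    exact ⟨s, t, by simp⟩

lemma prefix_slash (l : List Char) : ['/'] <+: l ↔ l.head? = some '/' := by
  cases l <;> simp [eq_comm]

lemma isPrefixOf_drop (s : List Char) (k : Nat) :
    ['/'].isPrefixOf (s.drop k) = true ↔ s[k]? = some '/' := by
  rw [List.isPrefixOf_iff_prefix, prefix_slash, List.head?_drop]

lemma go_zero (s sub : List Char) :
    PySem.Chars.rfind.go s sub 0 = if sub.isPrefixOf s = true then 0 else -1 := by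
  rw [PySem.Chars.rfind.go.eq_def]

lemma go_succ (s sub : List Char) (j : Nat) :
    PySem.Chars.rfind.go s sub (j + 1) =
      if sub.isPrefixOf (s.drop (j + 1)) = true then ((j + 1 : Nat) : Int)
      else PySem.Chars.rfind.go s sub j := by
  rw [PySem.Chars.rfind.go.eq_def]

lemma go_spec (s : List Char) (j : Nat) :
    (PySem.Chars.rfind.go s ['/'] j = -1 ∧ ∀ k, k ≤ j → s[k]? ≠ some '/')
    ∨ (∃ n : Nat, PySem.Chars.rfind.go s ['/'] j = (n : Int) ∧ n ≤ j ∧ s[n]? = some '/'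
        ∧ ∀ k, n < k → k ≤ j → s[k]? ≠ some '/') := by
  induction j with
  | zero =>
    rw [go_zero]
    by_cases h : ['/'].isPrefixOf s = true
    · right
      refine ⟨0, by simp [h], Nat.le_refl 0, ?_, ?_⟩
      · have h0 := (isPrefixOf_drop s 0).mp (by simpa using h)
        exact h0
      · intro k h1 h2; omega
    · left
      refine ⟨by simp [h], ?_⟩
      intro k hk
      have hk0 : k = 0 := by omega
      subst hk0
      intro hc
      exact h ((isPrefixOf_drop s 0).mpr (by simpa using hc))
  | succ j ih =>
    rw [go_succ]
    by_cases h : ['/'].isPrefixOf (s.drop (j + 1)) = true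
    · right
      exact ⟨j + 1, by simp [h], Nat.le_refl _, (isPrefixOf_drop s (j + 1)).mp h,
        fun k h1 h2 => by omega⟩
    · have hno : s[j + 1]? ≠ some '/' := fun hc => h ((isPrefixOf_drop s (j + 1)).mpr hc)
      rcases ih with ⟨h1, h2⟩ | ⟨n, h1, h2, h3, h4⟩
      · left
        refine ⟨by simp [h, h1], ?_⟩
        intro k hk
        rcases Nat.lt_or_ge k (j + 1) with hk2 | hk2
        · exact h2 k (by omega)
        · have : k = j + 1 := by omega
          subst this; exact hno
      · right
        refine ⟨n, by simp [h, h1], by omega, h3, ?_⟩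
        intro k hk1 hk2
        rcases Nat.lt_or_ge k (j + 1) with hk3 | hk3
        · exact h4 k hk1 (by omega)
        · have : k = j + 1 := by omega
          subst this; exact hno

lemma rfind_spec (s : List Char) :
    (PySem.Chars.rfind s ['/'] = -1 ∧ ∀ k : Nat, s[k]? ≠ some '/')
    ∨ (∃ n : Nat, PySem.Chars.rfind s ['/'] = (n : Int) ∧ n < s.length ∧ s[n]? = some '/'
        ∧ ∀ k, n < k → s[k]? ≠ some '/') := by
  have h := go_spec s s.length
  rcases h with ⟨h1, h2⟩ | ⟨n, h1, h2, h3, h4⟩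
  · left
    refine ⟨h1, fun k => ?_⟩
    by_cases hk : k ≤ s.length
    · exact h2 k hk
    · simp [List.getElem?_eq_none (by omega : s.length ≤ k)]
  · right
    have hn : n < s.length := (List.getElem?_eq_some_iff.mp h3).1
    refine ⟨n, h1, hn, h3, fun k hk => ?_⟩
    by_cases hk2 : k ≤ s.length
    · exact h4 k hk hk2
    · simp [List.getElem?_eq_none (by omega : s.length ≤ k)]

-- the heart of the equivalence: A's "starts with d ++ '/' and the rest is a bare file name"
-- is exactly B's "the last '/' is not the final character and everything before it is d"
lemma key_chars (p s : List Char) :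
    ((p ++ ['/']) <+: s ∧ s.drop (p.length + 1) ≠ [] ∧ '/' ∉ s.drop (p.length + 1))
    ↔ (PySem.Chars.rfind s ['/'] ≠ -1 ∧ PySem.Chars.rfind s ['/'] ≠ (s.length : Int) - 1
        ∧ s.take (PySem.Chars.rfind s ['/']).toNat = p) := by
  constructor
  · rintro ⟨⟨t, ht⟩, h2, h3⟩
    have hs : s = p ++ '/' :: t := by rw [← ht]; simp
    subst hs
    have hdrop : (p ++ '/' :: t).drop (p.length + 1) = t := by
      have h := (List.drop_left : List.drop ((p ++ ['/']).length) ((p ++ ['/']) ++ t) = t)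
      simp only [List.length_append, List.length_cons, List.length_nil, List.append_assoc,
        List.singleton_append] at h
      exact h
    rw [hdrop] at h2 h3
    have hmid : (p ++ '/' :: t)[p.length]? = some '/' := by
      rw [List.getElem?_append_right (Nat.le_refl _)]
      simp
    have hlen : (p ++ '/' :: t).length = p.length + 1 + t.length := by simp; omega
    rcases rfind_spec (p ++ '/' :: t) with ⟨h4, h5⟩ | ⟨n, h4, h5, h6, h7⟩
    · exact absurd hmid (h5 p.length)
    · have hn : n = p.length := by
        rcases Nat.lt_trichotomy n p.length with hlt | heq | hgt
        · exact absurd hmid (h7 p.length hlt)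
        · exact heq
        · exfalso
          have hget : (p ++ '/' :: t)[n]? = ('/' :: t)[n - p.length]? := by
            rw [List.getElem?_append_right (by omega)]
          have hidx : ('/' :: t)[n - p.length]? = t[n - p.length - 1]? := by
            rcases Nat.exists_eq_add_of_lt hgt with ⟨m, hm⟩
            have : n - p.length = m + 1 := by omega
            rw [this]; simp
          have : t[n - p.length - 1]? = some '/' := by rw [← hidx, ← hget]; exact h6
          exact h3 (List.mem_of_getElem? this)
      subst hn
      refine ⟨by rw [h4]; omega, ?_, ?_⟩
      · rw [h4, hlen]
        have ht1 : 1 ≤ t.length := by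
          cases t with
          | nil => exact absurd rfl h2
          | cons a l => simp
        push_cast
        omega
      · rw [h4]
        have : ((p.length : Int)).toNat = p.length := by simp
        rw [this]
        exact (List.take_left : List.take (p.length) (p ++ ('/' :: t)) = p)
  · rintro ⟨h1, h2, h3⟩
    rcases rfind_spec s with ⟨h4, _⟩ | ⟨n, h4, h5, h6, h7⟩
    · exact absurd h4 h1
    · rw [h4] at h2 h3
      have htn : ((n : Int)).toNat = n := by simp
      rw [htn] at h3
      have hplen : p.length = n := by rw [← h3]; simp [Nat.min_eq_left (Nat.le_of_lt h5)]
      have hget : s[n] = '/' := (List.getElem?_eq_some_iff.mp h6).2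
      have hsplit : s = p ++ '/' :: s.drop (n + 1) := by
        conv_lhs => rw [← List.take_append_drop n s]
        rw [h3, List.drop_eq_getElem_cons h5, hget]
      refine ⟨⟨s.drop (n + 1), by
        simp only [List.append_assoc, List.singleton_append]; exact hsplit.symm⟩, ?_, ?_⟩
      · rw [hplen]
        intro hnil
        have hl := congrArg List.length hnil
        rw [List.length_drop] at hl
        simp at hl
        have : s.length = n + 1 := by omega
        rw [this] at h2
        push_cast at h2
        omega
      · rw [hplen]
        intro hm
        rcases List.mem_iff_getElem?.mp hm with ⟨i, hi⟩
        rw [List.getElem?_drop] at hi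
        exact h7 (n + 1 + i) (by omega) hi

-- the string-level condition A tests equals the boolean test matchesB
lemma cond_iff (d f : String) :
    (PySem.Str.startswith f (d ++ "/") = true ∧
     PySem.Str.slice f (some (PySem.Str.len (d ++ "/"))) none ≠ "" ∧
     PySem.Str.isIn "/" (PySem.Str.slice f (some (PySem.Str.len (d ++ "/"))) none) = false)
    ↔ ((PySem.Str.rfind f "/" ≠ -1 ∧ PySem.Str.rfind f "/" ≠ PySem.Str.len f - 1) ∧
       parentOf f = d) := by
  have hpre : (d ++ "/").toList = d.toList ++ ['/'] := by rw [String.toList_append]; rfl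
  have hlen : PySem.Str.len (d ++ "/") = ((d.toList.length + 1 : Nat) : Int) := by
    rw [PySem.Str.len_eq, hpre]; simp
  have hrel : (PySem.Str.slice f (some (PySem.Str.len (d ++ "/"))) none).toList
      = f.toList.drop (d.toList.length + 1) := by
    rw [PySem.Str.toList_slice, PySem.Chars.slice_eq_listSlice, hlen,
      PySem.List.slice_from _ (by exact_mod_cast Nat.zero_le _)]
    simp
  have hrfind : PySem.Str.rfind f "/" = PySem.Chars.rfind f.toList ['/'] := by
    rw [PySem.Str.rfind_eq, toList_slash]
  constructor
  · rintro ⟨h1, h2, h3⟩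
    have hc1 : (d.toList ++ ['/']) <+: f.toList := by
      rw [PySem.Str.startswith_eq, PySem.Chars.startswith_iff, hpre] at h1; exact h1
    have hc2 : f.toList.drop (d.toList.length + 1) ≠ [] := by
      rw [← hrel]; exact (ne_empty_iff _).mp h2
    have hc3 : '/' ∉ f.toList.drop (d.toList.length + 1) := by
      intro hm
      rw [PySem.Str.isIn_eq, toList_slash, hrel] at h3
      exact absurd ((singleton_infix '/' _).mpr hm)
        ((PySem.Chars.isIn_eq_false_iff _ _).mp h3)
    obtain ⟨g1, g2, g3⟩ := (key_chars d.toList f.toList).mp ⟨hc1, hc2, hc3⟩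
    refine ⟨⟨by rw [hrfind]; exact g1, ?_⟩, ?_⟩
    · rw [hrfind, PySem.Str.len_eq]; exact g2
    · have h0 : (0 : Int) ≤ PySem.Chars.rfind f.toList ['/'] := by
        rcases rfind_spec f.toList with ⟨h4, _⟩ | ⟨n, h4, _, _, _⟩
        · exact absurd h4 g1
        · rw [h4]; exact_mod_cast Nat.zero_le n
      rw [← String.toList_inj]
      unfold parentOf
      rw [PySem.Str.toList_slice, PySem.Chars.slice_eq_listSlice, hrfind,
        PySem.List.slice_to _ h0]
      exact g3
  · rintro ⟨⟨h1, h2⟩, hp⟩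
    rw [hrfind] at h1
    rw [hrfind, PySem.Str.len_eq] at h2
    have h0 : (0 : Int) ≤ PySem.Chars.rfind f.toList ['/'] := by
      rcases rfind_spec f.toList with ⟨h4, _⟩ | ⟨n, h4, _, _, _⟩
      · exact absurd h4 h1
      · rw [h4]; exact_mod_cast Nat.zero_le n
    have hp' : f.toList.take (PySem.Chars.rfind f.toList ['/']).toNat = d.toList := by
      rw [← String.toList_inj] at hp
      unfold parentOf at hp
      rw [PySem.Str.toList_slice, PySem.Chars.slice_eq_listSlice, hrfind,
        PySem.List.slice_to _ h0] at hp
      exact hp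
    obtain ⟨hc1, hc2, hc3⟩ := (key_chars d.toList f.toList).mpr ⟨h1, h2, hp'⟩
    refine ⟨?_, ?_, ?_⟩
    · rw [PySem.Str.startswith_eq, PySem.Chars.startswith_iff, hpre]; exact hc1
    · rw [ne_empty_iff, hrel]; exact hc2
    · rw [PySem.Str.isIn_eq, toList_slash, hrel]
      rw [PySem.Chars.isIn_eq_false_iff]
      intro hinf
      exact hc3 ((singleton_infix '/' _).mp hinf)

-- A's inner pass over all files for directory d is a fold of Set.add over the matching files
lemma innerA (files : List String) (d : String) (res : List String) :
    files.foldl (fun result f =>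
      if PySem.Str.startswith f (d ++ "/") = true then
        if PySem.Str.slice f (some (PySem.Str.len (d ++ "/"))) none ≠ "" ∧
           PySem.Str.isIn "/" (PySem.Str.slice f (some (PySem.Str.len (d ++ "/"))) none) = false then
          PySem.Set.add result f
        else result
      else result) res
    = (files.filter (matchesB d)).foldl (fun result f => PySem.Set.add result f) res := by
  rw [List.foldl_filter]
  have hfun : (fun (result : List String) f =>
      if PySem.Str.startswith f (d ++ "/") = true then
        if PySem.Str.slice f (some (PySem.Str.len (d ++ "/"))) none ≠ "" ∧
           PySem.Str.isIn "/" (PySem.Str.slice f (some (PySem.Str.len (d ++ "/"))) none) = false then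
          PySem.Set.add result f
        else result
      else result)
      = fun (result : List String) f =>
        if matchesB d f = true then PySem.Set.add result f else result := by
    funext r f
    by_cases hp : ((PySem.Str.rfind f "/" ≠ -1 ∧ PySem.Str.rfind f "/" ≠ PySem.Str.len f - 1) ∧
        parentOf f = d)
    · obtain ⟨c1, c2, c3⟩ := (cond_iff d f).mpr hp
      have hb : matchesB d f = true := by unfold matchesB; exact decide_eq_true hp
      rw [hb, if_pos rfl, if_pos c1, if_pos ⟨c2, c3⟩]
    · have hb : matchesB d f = false := by unfold matchesB; exact decide_eq_false hp
      by_cases c1 : PySem.Str.startswith f (d ++ "/") = true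
      · by_cases c23 : (PySem.Str.slice f (some (PySem.Str.len (d ++ "/"))) none ≠ "" ∧
            PySem.Str.isIn "/" (PySem.Str.slice f (some (PySem.Str.len (d ++ "/"))) none) = false)
        · exact absurd ((cond_iff d f).mp ⟨c1, c23.1, c23.2⟩) hp
        · rw [if_pos c1, if_neg c23, hb, if_neg (Bool.false_ne_true)]
      · rw [if_neg c1, hb, if_neg (Bool.false_ne_true)]
  rw [hfun]

-- B's conditional dict-building fold is the plain pair fold over the matching files
lemma groups_pairs (files : List String) (init : PySem.Dict String (List String)) :
    files.foldl (fun groups f =>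
      if PySem.Str.rfind f "/" ≠ -1 ∧ PySem.Str.rfind f "/" ≠ PySem.Str.len f - 1 then
        groups.modify (PySem.Str.slice f none (some (PySem.Str.rfind f "/"))) [] (fun g => g ++ [f])
      else groups) init
    = ((files.filter (fun f =>
          decide (PySem.Str.rfind f "/" ≠ -1 ∧ PySem.Str.rfind f "/" ≠ PySem.Str.len f - 1))).map
        (fun f => (parentOf f, f))).foldl
        (fun dd p => dd.modify p.1 [] (fun x => x ++ [p.2])) init := by
  induction files generalizing init with
  | nil => rfl
  | cons f fs ih =>
    rw [List.foldl_cons, List.filter_cons]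
    by_cases h : (PySem.Str.rfind f "/" ≠ -1 ∧ PySem.Str.rfind f "/" ≠ PySem.Str.len f - 1)
    · rw [if_pos h, if_pos (by simpa using h), List.map_cons, List.foldl_cons]
      rw [ih]
      rfl
    · rw [if_neg h, if_neg (by simpa using h)]
      exact ih _

-- what B's dict answers for directory d: exactly the files matching d, in files order
lemma getD_groups (files : List String) (d : String) :
    (files.foldl (fun groups f =>
      if PySem.Str.rfind f "/" ≠ -1 ∧ PySem.Str.rfind f "/" ≠ PySem.Str.len f - 1 then
        groups.modify (PySem.Str.slice f none (some (PySem.Str.rfind f "/"))) [] (fun g => g ++ [f])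
      else groups) (PySem.Dict.empty : PySem.Dict String (List String))).getD d []
    = files.filter (matchesB d) := by
  rw [groups_pairs, PySem.Dict.getD_foldl_modify_append]
  have hempty : (PySem.Dict.empty : PySem.Dict String (List String)).getD d [] = [] := rfl
  rw [hempty, List.nil_append, List.filter_map, List.map_map]
  have hm : ((fun (x : String × String) => x.2) ∘ fun f => (parentOf f, f)) = id := rfl
  rw [hm, List.map_id, List.filter_filter]
  apply List.filter_congr
  intro f _
  simp only [Function.comp, matchesB]
  by_cases h1 : (PySem.Str.rfind f "/" ≠ -1 ∧ PySem.Str.rfind f "/" ≠ PySem.Str.len f - 1) <;>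
    by_cases h2 : parentOf f = d <;> simp [h2]

-- ===== VERDICT (by name: the statement is the Claim_ definition above) =====
theorem get_files_in_directories_spec : Claim_equal_get_files_in_directories := by
  intro files directories _
  unfold Spec_get_files_in_directories
  unfold get_files_in_directories get_files_in_directories_alt
  simp only [innerA, getD_groups]
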